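-- pv_equiv track=rewrite | github.com/HonniLin/leetcode | 1306.Jump-Game-III.py | canReach
-- ===== SOURCE A (Python) =====
-- def canReach(arr, start):
--     """
--     :type arr: List[int]
--     :type start: int
--     :rtype: bool
--     :desc dfs
--     """
--     if arr[start] == 0:
--         return True
--     n = len(arr)
--     que = list()
--     que.append(start)
--     used = [start]
--     while que:
--         top = que.pop()
--         for v in [top - arr[top], top + arr[top]]:
--             if 0 <= v < n and v not in used:
--                 if arr[v] == 0:
--                     return True
--                 used.append(v)
--                 que.append(v)
--     return False
-- ===== SOURCE B (Python) =====
-- def canReach(arr, start):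
--     # Fixpoint saturation: grow the set of reachable indices for n rounds
--     # (enough to saturate), then test whether any reachable index holds 0.
--     n = len(arr)
--     reach = {start}
--     for _ in range(n):
--         nxt = set(reach)
--         for i in reach:
--             a = arr[i]
--             for v in (i - a, i + a):
--                 if 0 <= v < n:
--                     nxt.add(v)
--         reach = nxt
--     return any(arr[i] == 0 for i in reach)
-- ===== Notes on version B (the rewrite author's own statement) =====
-- stated objective: alternative
-- what changed: A's early-exit DFS worklist (explicit stack 'que' plus a linear-scan 'used' list) is replaced by a round-based fixpoint saturation: B grows the set of reachable indices for len(arr) rounds until it is necessarily closed, then scans once for a reachable zero.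
import Mathlib
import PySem

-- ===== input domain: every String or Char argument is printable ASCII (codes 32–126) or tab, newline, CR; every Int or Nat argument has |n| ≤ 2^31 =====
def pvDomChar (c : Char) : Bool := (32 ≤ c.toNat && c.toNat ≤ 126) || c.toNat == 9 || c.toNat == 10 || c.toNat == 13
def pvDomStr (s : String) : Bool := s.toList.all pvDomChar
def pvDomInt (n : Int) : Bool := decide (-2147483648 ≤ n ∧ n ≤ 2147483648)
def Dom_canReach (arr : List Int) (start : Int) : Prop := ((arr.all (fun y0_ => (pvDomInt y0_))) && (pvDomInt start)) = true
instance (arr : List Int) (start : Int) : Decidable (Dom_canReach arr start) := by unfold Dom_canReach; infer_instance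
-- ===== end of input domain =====

-- B replaces A's early-exit DFS worklist with a round-based fixpoint saturation of the
-- reachable-index set followed by a single 'any' scan; alternative decomposition, not faster.

-- ===== PORT A =====
-- A's inner 'for v in [top-arr[top], top+arr[top]]' body for one candidate v:
-- 'none' models the 'return True' exit, 'some (used, que)' the updated state.
def tryV (arr : List Int) (uq : List Int × List Int) (v : Int) : Option (List Int × List Int) :=
  if 0 ≤ v ∧ v < (arr.length : Int) ∧ ¬ v ∈ uq.1 then
    if PySem.List.pyGetD arr v 0 = 0 then none
    else some (uq.1 ++ [v], uq.2 ++ [v])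
  else some uq

-- A's 'while que' loop; fuel (arr.length + 2) is a totality guard only: the loop runs at
-- most arr.length + 1 iterations (each iteration pops one element and every push is paired
-- with appending a fresh element to the duplicate-free 'used'), so fuel never runs out.
-- arr[top]/arr[v] are ported with pyGetD: every index read is in range under Pre_.
def loopA (arr : List Int) : Nat → List Int → List Int → Bool
  | 0, _, _ => false
  | fuel+1, que, used =>
    if hq : que = [] then false
    else
      let top := que.getLast hq
      let que' := que.dropLast
      let a := PySem.List.pyGetD arr top 0
      match tryV arr (used, que') (top - a) with
      | none => true
      | some uq1 =>
        match tryV arr uq1 (top + a) with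
        | none => true
        | some uq2 => loopA arr fuel uq2.2 uq2.1

def canReach (arr : List Int) (start : Int) : Bool :=
  match PySem.List.pyGet? arr start with
  | none => false            -- Python raises IndexError here; excluded by Pre_canReach
  | some a0 =>
    if a0 = 0 then true
    else loopA arr (arr.length + 2) [start] [start]

-- ===== PORT B =====
-- one iteration of B's 'for i in reach: for v in (i-arr[i], i+arr[i]): if 0<=v<n: nxt.add(v)'
def expandStep (arr : List Int) (nxt : PySem.Set Int) (i : Int) : PySem.Set Int :=
  let a := PySem.List.pyGetD arr i 0
  let nxt1 := if 0 ≤ i - a ∧ i - a < (arr.length : Int) then PySem.Set.add nxt (i - a) else nxt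
  if 0 ≤ i + a ∧ i + a < (arr.length : Int) then PySem.Set.add nxt1 (i + a) else nxt1

-- one round: 'nxt = set(reach); for i in reach: …; reach = nxt'
def expandReach (arr : List Int) (r : PySem.Set Int) : PySem.Set Int :=
  r.foldl (expandStep arr) r

def canReach_alt (arr : List Int) (start : Int) : Bool :=
  -- 'for _ in range(n)' saturation rounds
  let reach := (List.range arr.length).foldl (fun r _ => expandReach arr r) (PySem.Set.ofList [start])
  -- 'any(arr[i] == 0 for i in reach)' (order-insensitive consumption of the set)
  reach.any (fun i => decide (PySem.List.pyGetD arr i 0 = 0))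

-- ===== PRECONDITION & SPEC =====
-- Pre_ excludes exactly the inputs where Python A raises IndexError at 'arr[start]'
-- (start outside [-len(arr), len(arr)), in particular any start on an empty arr).
def Pre_canReach (arr : List Int) (start : Int) : Prop :=
  PySem.Raise.InRange arr.length start
instance (arr : List Int) (start : Int) : Decidable (Pre_canReach arr start) := by
  unfold Pre_canReach; infer_instance

def pvWitness_canReach : List Int × Int := ([4, 2, 3, 0, 3, 1, 2], 5)

def Spec_canReach (arr : List Int) (start : Int) (out : Bool) : Prop := out = canReach_alt arr start
instance (arr : List Int) (start : Int) (out : Bool) : Decidable (Spec_canReach arr start out) := by unfold Spec_canReach; infer_instance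

-- ===== CLAIM (what is proved, stated in full; the proofs are below) =====
def Claim_equal_canReach : Prop := ∀ (arr : List Int) (start : Int), Dom_canReach arr start → Pre_canReach arr start → Spec_canReach arr start (canReach arr start)

-- ===== LEMMAS AND PROOFS =====

-- jump adjacency: v is a legal jump target from i
def rAdj (arr : List Int) (i v : Int) : Prop :=
  (v = i - PySem.List.pyGetD arr i 0 ∨ v = i + PySem.List.pyGetD arr i 0) ∧
    0 ≤ v ∧ v < (arr.length : Int)

-- indices reachable from start by jumps
inductive rReach (arr : List Int) (start : Int) : Int → Prop
  | base : rReach arr start start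
  | step : ∀ {i v : Int}, rReach arr start i → rAdj arr i v → rReach arr start v

lemma bool_eq_of_iff {a b : Bool} (h : a = true ↔ b = true) : a = b := by
  cases a <;> cases b <;> simp_all

-- any duplicate-free list of indices drawn from {start} ∪ [0, n) has at most n+1 elements
lemma nodup_bounded_length (arr : List Int) (start : Int) (l : List Int)
    (hnd : l.Nodup) (hr : ∀ x ∈ l, x = start ∨ (0 ≤ x ∧ x < (arr.length : Int))) :
    l.length ≤ arr.length + 1 := by
  have hsub : l ⊆ start :: PySem.List.pyRange 0 (arr.length : Int) 1 := by
    intro x hx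
    rcases hr x hx with h | h
    · simp [h]
    · exact List.mem_cons_of_mem _ (by rw [PySem.List.mem_pyRange_one]; omega)
  have hle := (List.subperm_of_subset hnd hsub).length_le
  simpa [PySem.List.length_pyRange_one] using hle

lemma reach_mem_of_closed (arr : List Int) (start : Int) (used : List Int)
    (hs : start ∈ used) (hc : ∀ x ∈ used, ∀ v, rAdj arr x v → v ∈ used) :
    ∀ z, rReach arr start z → z ∈ used := by
  intro z hz
  induction hz with
  | base => exact hs
  | step h ha ih => exact hc _ ih _ ha

-- invariant package for A's loop state (used, que), minus the closedness clause
def InvA (arr : List Int) (start : Int) (u q : List Int) : Prop :=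
  (∀ x ∈ q, x ∈ u) ∧ q.Nodup ∧ u.Nodup ∧
  (∀ x ∈ u, x = start ∨ (0 ≤ x ∧ x < (arr.length : Int))) ∧
  (∀ x ∈ u, rReach arr start x) ∧
  (∀ x ∈ u, PySem.List.pyGetD arr x 0 ≠ 0) ∧ start ∈ u

lemma tryV_none_iff (arr : List Int) (u q : List Int) (v : Int) :
    tryV arr (u, q) v = none ↔
      (0 ≤ v ∧ v < (arr.length : Int) ∧ v ∉ u) ∧ PySem.List.pyGetD arr v 0 = 0 := by
  unfold tryV
  split_ifs with h1 h2 <;> simp_all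

lemma tryV_some_inv (arr : List Int) (start top v : Int) (u q u' q' : List Int)
    (htop : rReach arr start top)
    (hv : v = top - PySem.List.pyGetD arr top 0 ∨ v = top + PySem.List.pyGetD arr top 0)
    (hInv : InvA arr start u q)
    (h : tryV arr (u, q) v = some (u', q')) :
    ∃ L, u' = u ++ L ∧ q' = q ++ L ∧
      InvA arr start u' q' ∧
      ((0 ≤ v ∧ v < (arr.length : Int)) → v ∈ u') := by
  obtain ⟨hsub, hqn, hun, hrange, hreach, hnz, hstart⟩ := hInv
  unfold tryV at h
  by_cases hc : 0 ≤ v ∧ v < (arr.length : Int) ∧ v ∉ u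
  · rw [if_pos hc] at h
    by_cases hz : PySem.List.pyGetD arr v 0 = 0
    · rw [if_pos hz] at h; cases h
    · rw [if_neg hz] at h
      injection h with h'
      injection h' with hu' hq'
      subst hu' hq'
      refine ⟨[v], rfl, rfl, ⟨?_, ?_, ?_, ?_, ?_, ?_, ?_⟩, fun _ => ?_⟩
      · intro x hx
        rcases List.mem_append.mp hx with hx | hx
        · exact List.mem_append.mpr (Or.inl (hsub x hx))
        · exact List.mem_append.mpr (Or.inr hx)
      · simp only [List.nodup_append, List.nodup_cons, List.not_mem_nil, List.nodup_nil]
        exact ⟨hqn, by simp, by intro x hx y hy; simp at hy; subst hy; intro he; subst he; exact hc.2.2 (hsub x hx)⟩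
      · simp only [List.nodup_append, List.nodup_cons, List.not_mem_nil, List.nodup_nil]
        exact ⟨hun, by simp, by intro x hx y hy; simp at hy; subst hy; intro he; subst he; exact hc.2.2 hx⟩
      · intro x hx
        rcases List.mem_append.mp hx with hx | hx
        · exact hrange x hx
        · simp at hx; subst hx; exact Or.inr ⟨hc.1, hc.2.1⟩
      · intro x hx
        rcases List.mem_append.mp hx with hx | hx
        · exact hreach x hx
        · simp at hx; subst hx; exact .step htop ⟨hv, hc.1, hc.2.1⟩
      · intro x hx
        rcases List.mem_append.mp hx with hx | hx
        · exact hnz x hx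
        · simp at hx; subst hx; exact hz
      · exact List.mem_append.mpr (Or.inl hstart)
      · exact List.mem_append.mpr (Or.inr (by simp))
  · rw [if_neg hc] at h
    injection h with h'
    injection h' with hu' hq'
    subst hu' hq'
    refine ⟨[], by simp, by simp, ⟨hsub, hqn, hun, hrange, hreach, hnz, hstart⟩, fun hb => ?_⟩
    by_contra hvu
    exact hc ⟨hb.1, hb.2, hvu⟩

-- characterization of A's loop: under the invariants it decides reachability of a zero
lemma loopA_iff (arr : List Int) (start : Int) :
    ∀ (fuel : Nat) (que used : List Int),
      InvA arr start used que →
      (∀ x ∈ used, x ∉ que → ∀ v, rAdj arr x v → v ∈ used) →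
      (arr.length + 1 - used.length) + que.length < fuel →
      (loopA arr fuel que used = true ↔
        ∃ z, rReach arr start z ∧ PySem.List.pyGetD arr z 0 = 0) := by
  intro fuel
  induction fuel with
  | zero => intro que used _ _ hf; omega
  | succ fuel ih =>
    intro que used hInv hclosed hfuel
    by_cases hq : que = []
    · subst hq
      simp only [loopA, dif_pos]
      constructor
      · intro h; cases h
      · rintro ⟨z, hz, hz0⟩
        have hcl : ∀ x ∈ used, ∀ v, rAdj arr x v → v ∈ used := by
          intro x hx v hv; exact hclosed x hx (by simp) v hv
        exact absurd hz0 (hInv.2.2.2.2.2.1 z (reach_mem_of_closed arr start used hInv.2.2.2.2.2.2 hcl z hz))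
    · obtain ⟨q0, top, rfl⟩ : ∃ q0 top, que = q0 ++ [top] :=
        ⟨que.dropLast, que.getLast hq, (List.dropLast_append_getLast hq).symm⟩
      obtain ⟨hsub, hqn, hun, hrange, hreach, hnz, hstart⟩ := hInv
      have htopu : top ∈ used := hsub top (by simp)
      have htopr : rReach arr start top := hreach top htopu
      have hq0sub : ∀ x ∈ q0, x ∈ used := fun x hx => hsub x (by simp [hx])
      have hq0nd : q0.Nodup ∧ top ∉ q0 := by
        simp only [List.nodup_append, List.nodup_cons, List.not_mem_nil, List.nodup_nil] at hqn
        exact ⟨hqn.1, fun hx => hqn.2.2 top hx top (by simp) rfl⟩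
      have hInv0 : InvA arr start used q0 :=
        ⟨hq0sub, hq0nd.1, hun, hrange, hreach, hnz, hstart⟩
      simp only [loopA, dif_neg hq, List.getLast_concat, List.dropLast_concat]
      cases h1 : tryV arr (used, q0) (top - PySem.List.pyGetD arr top 0) with
      | none =>
        dsimp only
        obtain ⟨hb, hz⟩ := (tryV_none_iff arr used q0 _).mp h1
        constructor
        · intro _
          exact ⟨top - PySem.List.pyGetD arr top 0,
            .step htopr ⟨Or.inl rfl, hb.1, hb.2.1⟩, hz⟩
        · intro _; rfl
      | some uq1 =>
        obtain ⟨u1, q1⟩ := uq1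
        dsimp only
        obtain ⟨L1, hu1, hq1, hInv1, hv1⟩ :=
          tryV_some_inv arr start top (top - PySem.List.pyGetD arr top 0) used q0 u1 q1
            htopr (Or.inl rfl) hInv0 h1
        cases h2 : tryV arr (u1, q1) (top + PySem.List.pyGetD arr top 0) with
        | none =>
          dsimp only
          obtain ⟨hb, hz⟩ := (tryV_none_iff arr u1 q1 _).mp h2
          constructor
          · intro _
            exact ⟨top + PySem.List.pyGetD arr top 0,
              .step htopr ⟨Or.inr rfl, hb.1, hb.2.1⟩, hz⟩
          · intro _; rfl
        | some uq2 =>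
          obtain ⟨u2, q2⟩ := uq2
          dsimp only
          obtain ⟨L2, hu2, hq2, hInv2, hv2⟩ :=
            tryV_some_inv arr start top (top + PySem.List.pyGetD arr top 0) u1 q1 u2 q2
              htopr (Or.inr rfl) hInv1 h2
          subst hu1 hq1 hu2 hq2
          apply ih
          · exact hInv2
          · -- closedness for the recursive state
            intro x hxu hxq v hadj
            rcases List.mem_append.mp hxu with hxu' | hxL2
            · rcases List.mem_append.mp hxu' with hxused | hxL1
              · by_cases hxque : x ∈ q0 ++ [top]
                · rcases List.mem_append.mp hxque with hxq0 | hxtop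
                  · exact absurd (List.mem_append.mpr (Or.inl (List.mem_append.mpr (Or.inl hxq0)))) hxq
                  · simp at hxtop; subst hxtop
                    obtain ⟨hvv, hv0, hvN⟩ := hadj
                    rcases hvv with rfl | rfl
                    · exact List.mem_append.mpr (Or.inl (hv1 ⟨hv0, hvN⟩))
                    · exact hv2 ⟨hv0, hvN⟩
                · exact List.mem_append.mpr (Or.inl (List.mem_append.mpr
                    (Or.inl (hclosed x hxused hxque v hadj))))
              · exact absurd (List.mem_append.mpr (Or.inl (List.mem_append.mpr (Or.inr hxL1)))) hxq
            · exact absurd (List.mem_append.mpr (Or.inr hxL2)) hxq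
          · -- fuel bound
            have hlen : (used ++ L1 ++ L2).length ≤ arr.length + 1 :=
              nodup_bounded_length arr start _ hInv2.2.2.1 hInv2.2.2.2.1
            simp only [List.length_append, List.length_singleton] at hlen hfuel ⊢
            omega

-- ---- B side ----

lemma foldl_range_const (f : PySem.Set Int → PySem.Set Int) (s : PySem.Set Int) (k : Nat) :
    (List.range k).foldl (fun r _ => f r) s = f^[k] s := by
  induction k with
  | zero => rfl
  | succ k ih => rw [List.range_succ, List.foldl_append, ih, Function.iterate_succ_apply']; rfl

lemma mem_expandStep (arr : List Int) (nxt : PySem.Set Int) (i x : Int) :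
    x ∈ expandStep arr nxt i ↔ x ∈ nxt ∨ rAdj arr i x := by
  unfold expandStep rAdj
  dsimp only
  split_ifs with h1 h2 h2 <;> simp [PySem.Set.mem_add]
  · constructor
    · rintro ((hx | rfl) | rfl)
      · exact .inl hx
      · exact .inr ⟨.inl rfl, h2⟩
      · exact .inr ⟨.inr rfl, h1⟩
    · rintro (hx | ⟨(rfl | rfl), hb⟩)
      · exact .inl (.inl hx)
      · exact .inl (.inr rfl)
      · exact .inr rfl
  · constructor
    · rintro (hx | rfl)
      · exact .inl hx
      · exact .inr ⟨.inr rfl, h1⟩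
    · rintro (hx | ⟨(rfl | rfl), hb⟩)
      · exact .inl hx
      · exact absurd hb h2
      · exact .inr rfl
  · constructor
    · rintro (hx | rfl)
      · exact .inl hx
      · exact .inr ⟨.inl rfl, h2⟩
    · rintro (hx | ⟨(rfl | rfl), hb⟩)
      · exact .inl hx
      · exact .inr rfl
      · exact absurd hb h1
  · rintro (rfl | rfl) h0 hN
    · exact absurd ⟨h0, hN⟩ h2
    · exact absurd ⟨h0, hN⟩ h1

lemma prefix_expandStep (arr : List Int) (nxt : PySem.Set Int) (i : Int) :
    nxt <+: expandStep arr nxt i := by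
  unfold expandStep
  dsimp only
  have key : ∀ (s : PySem.Set Int) (v : Int), s <+: PySem.Set.add s v := by
    intro s v
    rw [PySem.Set.add_eq_ite]
    split_ifs
    · exact List.prefix_refl s
    · exact ⟨[v], rfl⟩
  split_ifs with h1 h2 h2
  · exact (key nxt _).trans (key _ _)
  · exact key nxt _
  · exact key nxt _
  · exact List.prefix_refl nxt

lemma nodup_expandStep (arr : List Int) (nxt : PySem.Set Int) (i : Int)
    (h : nxt.Nodup) : (expandStep arr nxt i).Nodup := by
  unfold expandStep
  dsimp only
  split_ifs <;>
    first
      | exact PySem.Set.nodup_add _ _ (PySem.Set.nodup_add _ _ h)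
      | exact PySem.Set.nodup_add _ _ h
      | exact h

lemma mem_foldl_expandStep (arr : List Int) :
    ∀ (l s : List Int) (x : Int),
      x ∈ l.foldl (expandStep arr) s ↔ x ∈ s ∨ ∃ i ∈ l, rAdj arr i x := by
  intro l
  induction l with
  | nil => simp
  | cons i t ih =>
    intro s x
    simp only [List.foldl_cons, ih, mem_expandStep, List.mem_cons]
    constructor
    · rintro ((h | h) | ⟨j, hj, hja⟩)
      · exact Or.inl h
      · exact Or.inr ⟨i, Or.inl rfl, h⟩
      · exact Or.inr ⟨j, Or.inr hj, hja⟩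
    · rintro (h | ⟨j, (rfl | hj), hja⟩)
      · exact Or.inl (Or.inl h)
      · exact Or.inl (Or.inr hja)
      · exact Or.inr ⟨j, hj, hja⟩

lemma prefix_foldl_expandStep (arr : List Int) :
    ∀ (l s : List Int), s <+: l.foldl (expandStep arr) s := by
  intro l
  induction l with
  | nil => intro s; exact List.prefix_refl s
  | cons i t ih =>
    intro s
    exact (prefix_expandStep arr s i).trans (ih _)

lemma nodup_foldl_expandStep (arr : List Int) :
    ∀ (l s : List Int), s.Nodup → (l.foldl (expandStep arr) s).Nodup := by
  intro l
  induction l with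
  | nil => intro s h; exact h
  | cons i t ih => intro s h; exact ih _ (nodup_expandStep arr s i h)

lemma mem_expandReach (arr : List Int) (r : PySem.Set Int) (x : Int) :
    x ∈ expandReach arr r ↔ x ∈ r ∨ ∃ i ∈ r, rAdj arr i x :=
  mem_foldl_expandStep arr r r x

-- the k-th saturation round
def reachIter (arr : List Int) (start : Int) (k : Nat) : PySem.Set Int :=
  (expandReach arr)^[k] (PySem.Set.ofList [start])

lemma reachIter_succ (arr : List Int) (start : Int) (k : Nat) :
    reachIter arr start (k+1) = expandReach arr (reachIter arr start k) := by
  unfold reachIter; rw [Function.iterate_succ_apply']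

lemma reachIter_prefix (arr : List Int) (start : Int) (k : Nat) :
    reachIter arr start k <+: reachIter arr start (k+1) := by
  rw [reachIter_succ]; exact prefix_foldl_expandStep arr _ _

lemma reachIter_mono (arr : List Int) (start : Int) (k m : Nat) (h : k ≤ m) :
    ∀ x ∈ reachIter arr start k, x ∈ reachIter arr start m := by
  induction m with
  | zero => intro x hx; rw [Nat.le_zero.mp h]at hx; exact hx
  | succ m ihm =>
    intro x hx
    rcases Nat.lt_or_ge k (m+1) with h' | h'
    · exact (reachIter_prefix arr start m).subset (ihm (by omega) x hx)
    · rw [Nat.le_antisymm h h'] at hx; exact hx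

lemma reachIter_nodup (arr : List Int) (start : Int) (k : Nat) :
    (reachIter arr start k).Nodup := by
  induction k with
  | zero => simp [reachIter, PySem.Set.ofList]
  | succ k ih => rw [reachIter_succ]; exact nodup_foldl_expandStep arr _ _ ih

lemma reachIter_range (arr : List Int) (start : Int) (k : Nat) :
    ∀ x ∈ reachIter arr start k, x = start ∨ (0 ≤ x ∧ x < (arr.length : Int)) := by
  induction k with
  | zero => intro x hx; simp [reachIter, PySem.Set.ofList] at hx; exact Or.inl hx
  | succ k ih =>
    intro x hx
    rw [reachIter_succ] at hx
    rcases (mem_expandReach arr _ x).mp hx with hx | ⟨i, _, hi⟩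
    · exact ih x hx
    · exact Or.inr ⟨hi.2.1, hi.2.2⟩

lemma reachIter_len (arr : List Int) (start : Int) (k : Nat) :
    (reachIter arr start k).length ≤ arr.length + 1 :=
  nodup_bounded_length arr start _ (reachIter_nodup arr start k) (reachIter_range arr start k)

lemma reachIter_fix_propagates (arr : List Int) (start : Int) (k : Nat)
    (h : expandReach arr (reachIter arr start k) = reachIter arr start k) :
    ∀ m, k ≤ m → reachIter arr start m = reachIter arr start k := by
  intro m hm
  induction m with
  | zero => rw [Nat.le_zero.mp hm]
  | succ m ihm =>
    rcases Nat.lt_or_ge k (m+1) with h' | h'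
    · rw [reachIter_succ, ihm (by omega), h]
    · rw [Nat.le_antisymm hm h']

lemma reachIter_exists_fix (arr : List Int) (start : Int) :
    ∃ k ≤ arr.length, expandReach arr (reachIter arr start k) = reachIter arr start k := by
  by_contra hcon
  push Not at hcon
  have grow : ∀ k ≤ arr.length,
      (reachIter arr start k).length < (reachIter arr start (k+1)).length := by
    intro k hk
    have hpre := reachIter_prefix arr start k
    rcases Nat.lt_or_ge (reachIter arr start k).length (reachIter arr start (k+1)).length with h | h
    · exact h
    · have hkeq : reachIter arr start k = reachIter arr start (k+1) :=
        hpre.eq_of_length (Nat.le_antisymm hpre.length_le h)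
      exact absurd ((reachIter_succ arr start k).symm.trans hkeq.symm) (hcon k hk)
  have hlen : ∀ m, m ≤ arr.length + 1 → m + 1 ≤ (reachIter arr start m).length := by
    intro m
    induction m with
    | zero => intro _; simp [reachIter, PySem.Set.ofList]
    | succ m ihm =>
      intro hm
      have h1 := ihm (by omega)
      have h2 := grow m (by omega)
      omega
  have := hlen (arr.length + 1) (le_refl _)
  have := reachIter_len arr start (arr.length + 1)
  omega

lemma reachIter_closed (arr : List Int) (start : Int) :
    ∀ i ∈ reachIter arr start arr.length, ∀ v, rAdj arr i v →
      v ∈ reachIter arr start arr.length := by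
  obtain ⟨k, hk, hfix⟩ := reachIter_exists_fix arr start
  have heq : reachIter arr start arr.length = reachIter arr start k :=
    reachIter_fix_propagates arr start k hfix arr.length hk
  intro i hi v hv
  rw [heq] at hi ⊢
  rw [← hfix]
  exact (mem_expandReach arr _ v).mpr (Or.inr ⟨i, hi, hv⟩)

lemma reachIter_sound (arr : List Int) (start : Int) :
    ∀ k, ∀ x ∈ reachIter arr start k, rReach arr start x := by
  intro k
  induction k with
  | zero => intro x hx; simp [reachIter, PySem.Set.ofList] at hx; subst hx; exact .base
  | succ k ih =>
    intro x hx
    rw [reachIter_succ] at hx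
    rcases (mem_expandReach arr _ x).mp hx with hx | ⟨i, hi, hadj⟩
    · exact ih x hx
    · exact .step (ih i hi) hadj

lemma reachIter_complete (arr : List Int) (start : Int) :
    ∀ z, rReach arr start z → z ∈ reachIter arr start arr.length := by
  intro z hz
  induction hz with
  | base =>
    exact reachIter_mono arr start 0 arr.length (Nat.zero_le _) start
      (by simp [reachIter, PySem.Set.ofList])
  | step h hadj ih => exact reachIter_closed arr start _ ih _ hadj

lemma canReach_alt_iff (arr : List Int) (start : Int) :
    canReach_alt arr start = true ↔
      ∃ z, rReach arr start z ∧ PySem.List.pyGetD arr z 0 = 0 := by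
  unfold canReach_alt
  rw [foldl_range_const]
  simp only [List.any_eq_true, decide_eq_true_eq]
  constructor
  · rintro ⟨z, hz, hz0⟩
    exact ⟨z, reachIter_sound arr start arr.length z hz, hz0⟩
  · rintro ⟨z, hz, hz0⟩
    exact ⟨z, reachIter_complete arr start z hz, hz0⟩

-- ===== VERDICT (by name: the statement is the Claim_ definition above) =====
theorem canReach_spec : Claim_equal_canReach := by
  intro arr start _hdom hpre
  unfold Spec_canReach
  unfold Pre_canReach at hpre
  obtain ⟨a0, ha0⟩ : ∃ a0, PySem.List.pyGet? arr start = some a0 := by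
    cases h : PySem.List.pyGet? arr start with
    | none => exact absurd hpre ((PySem.List.pyGet?_eq_none_iff _ _).mp h)
    | some a0 => exact ⟨a0, rfl⟩
  have hval : PySem.List.pyGetD arr start 0 = a0 := by
    simp [PySem.List.pyGetD, ha0]
  unfold canReach
  rw [ha0]
  dsimp only
  by_cases hz : a0 = 0
  · rw [if_pos hz]
    exact ((canReach_alt_iff arr start).mpr ⟨start, .base, by rw [hval, hz]⟩).symm
  · rw [if_neg hz]
    apply bool_eq_of_iff
    refine (loopA_iff arr start (arr.length + 2) [start] [start] ?_ ?_ ?_).trans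
      (canReach_alt_iff arr start).symm
    · refine ⟨?_, ?_, ?_, ?_, ?_, ?_, ?_⟩
      · intro x hx; exact hx
      · simp
      · simp
      · intro x hx; simp at hx; subst hx; exact Or.inl rfl
      · intro x hx; simp at hx; subst hx; exact .base
      · intro x hx; simp at hx; subst hx; rw [hval]; exact hz
      · simp
    · intro x hx hnq; simp at hx; subst hx; simp at hnq
    · simp
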